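-- pv_equiv track=rewrite | github.com/AZS-FEFU/plates_recognizing | src/script.py | correct_plate
-- ===== SOURCE A (Python) =====
-- def correct_plate(plate):
--     replace_map = {
--         'S': '5',
--         'Y': 'У',
--         'N': 'Н',
--         'R': 'Р'
--     }
--     corrected = [replace_map.get(c, c) for c in plate]
--     return ''.join(corrected)
-- ===== SOURCE B (Python) =====
-- def correct_plate(plate):
--     for old, new in (('S', '5'), ('Y', 'У'), ('N', 'Н'), ('R', 'Р')):
--         plate = new.join(plate.split(old))
--     return plate
-- ===== Notes on version B (the rewrite author's own statement) =====
-- stated objective: alternative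
-- what changed: Instead of one per-character dict-lookup pass joined at the end, B runs a loop over the four (old,new) pairs and on each pass decomposes the whole string into the segments between occurrences of old (str.split) and reassembles them with new as the glue (str.join): a staged split/rejoin algorithm, safe because no replacement character is itself a replaced key.
import Mathlib
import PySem

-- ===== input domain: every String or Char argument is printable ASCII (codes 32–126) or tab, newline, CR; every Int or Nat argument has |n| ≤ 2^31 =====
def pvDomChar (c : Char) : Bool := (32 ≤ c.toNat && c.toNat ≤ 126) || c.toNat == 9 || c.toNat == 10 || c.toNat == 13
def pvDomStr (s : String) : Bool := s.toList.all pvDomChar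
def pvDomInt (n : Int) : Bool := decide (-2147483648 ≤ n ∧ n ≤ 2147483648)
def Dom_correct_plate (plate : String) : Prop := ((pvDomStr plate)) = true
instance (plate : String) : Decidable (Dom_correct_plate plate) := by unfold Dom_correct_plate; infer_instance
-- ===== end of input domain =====

-- B replaces the per-character dict-lookup comprehension with a loop over the four (old,new)
-- pairs, each pass splitting the string at old and rejoining with new (correct because no
-- replacement character is itself a replaced key).

-- ===== PORT A =====
-- dict keyed by 1-char strings, looked up with .get(c, c) for each character of plate, then ''.join
def correct_plate (plate : String) : String :=
  let replace_map : PySem.Dict String String :=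
    (PySem.Dict.empty.insert "S" "5").insert "Y" "У" |>.insert "N" "Н" |>.insert "R" "Р"
  let corrected : List String :=
    plate.toList.map (fun c => replace_map.getD (String.ofList [c]) (String.ofList [c]))
  PySem.Str.join "" corrected

-- ===== PORT B =====
-- for old, new in pairs: plate = new.join(plate.split(old));  split? is none only for an
-- empty separator, which never occurs here (totality guard, not a fallback algorithm)
def correct_plate_alt (plate : String) : String :=
  [("S", "5"), ("Y", "У"), ("N", "Н"), ("R", "Р")].foldl
    (fun p ab =>
      match PySem.Str.split? p ab.1 with
      | some parts => PySem.Str.join ab.2 parts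
      | none => p)
    plate

-- ===== PRECONDITION & SPEC =====
def Spec_correct_plate (plate : String) (out : String) : Prop := out = correct_plate_alt plate
instance (plate : String) (out : String) : Decidable (Spec_correct_plate plate out) := by unfold Spec_correct_plate; infer_instance

-- ===== CLAIM (what is proved, stated in full; the proofs are below) =====
def Claim_equal_correct_plate : Prop := ∀ (plate : String), Dom_correct_plate plate → Spec_correct_plate plate (correct_plate plate)

-- ===== LEMMAS AND PROOFS =====

-- the character substitution both programs effect
def pvFix (c : Char) : Char :=
  if c = 'S' then '5' else if c = 'Y' then 'У' else if c = 'N' then 'Н' else if c = 'R' then 'Р' else c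

-- pure structural version of splitOn with a single-char separator and a reversed current segment
def pvSplit (a : Char) : List Char → List Char → List (List Char)
  | [], cur => [cur.reverse]
  | c :: t, cur => if c = a then cur.reverse :: pvSplit a t [] else pvSplit a t (c :: cur)

theorem pvSplit_ne_nil (a : Char) : ∀ (l cur : List Char), pvSplit a l cur ≠ [] := by
  intro l
  induction l with
  | nil => intro cur; simp [pvSplit]
  | cons c t ih =>
    intro cur
    by_cases h : c = a
    · simp [pvSplit, h]
    · simp only [pvSplit, if_neg h]
      exact ih _

theorem splitOn_go_single (a : Char) :
    ∀ (fuel : Nat) (l cur : List Char) (accs : List (List Char)), l.length ≤ fuel →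
      PySem.Chars.splitOn.go [a] fuel l cur accs
        = accs.reverse ++ pvSplit a l cur := by
  intro fuel
  induction fuel with
  | zero =>
    intro l cur accs h
    cases l with
    | nil => simp [PySem.Chars.splitOn.go, pvSplit]
    | cons c t => simp at h
  | succ n ih =>
    intro l cur accs h
    cases l with
    | nil => simp [PySem.Chars.splitOn.go, pvSplit]
    | cons c t =>
      by_cases hc : c = a
      · subst hc
        have hpre : List.isPrefixOf [c] (c :: t) = true := by simp [List.isPrefixOf]
        rw [PySem.Chars.splitOn.go]
        simp only [hpre, if_true, List.length_cons, List.length_nil, List.drop_succ_cons,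
          List.drop_zero]
        rw [ih t [] (cur.reverse :: accs) (by simpa using Nat.le_of_succ_le_succ h)]
        simp [pvSplit]
      · have hpre : List.isPrefixOf [a] (c :: t) = false := by
          simp [List.isPrefixOf]
          exact fun h' => hc h'.symm
        rw [PySem.Chars.splitOn.go]
        simp only [hpre, Bool.false_eq_true, if_false]
        rw [ih t (c :: cur) accs (by simpa using Nat.le_of_succ_le_succ h)]
        simp [pvSplit, hc]

theorem splitOn_single (a : Char) (cs : List Char) :
    PySem.Chars.splitOn cs [a] = pvSplit a cs [] := by
  rw [PySem.Chars.splitOn]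
  simpa using splitOn_go_single a (cs.length + 1) cs [] [] (Nat.le_succ _)

theorem flatten_intersperse_cons {α : Type} (s x : List α) (l : List (List α)) (h : l ≠ []) :
    ((x :: l).intersperse s).flatten = x ++ s ++ (l.intersperse s).flatten := by
  cases l with
  | nil => exact absurd rfl h
  | cons y ys => simp [List.intersperse_cons₂]

theorem join_pvSplit (a b : Char) :
    ∀ (l cur : List Char),
      PySem.Chars.join [b] (pvSplit a l cur)
        = cur.reverse ++ l.map (fun c => if c = a then b else c) := by
  intro l
  induction l with
  | nil => intro cur; simp [pvSplit, PySem.Chars.join, List.intercalate]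
  | cons c t ih =>
    intro cur
    by_cases hc : c = a
    · subst hc
      simp only [pvSplit, if_true, PySem.Chars.join, List.intercalate] at *
      rw [flatten_intersperse_cons [b] cur.reverse _ (pvSplit_ne_nil c t [])]
      rw [ih []]
      simp
    · simp only [pvSplit, hc, if_false, List.map_cons]
      rw [ih (c :: cur)]
      simp

-- one split/join pass of B, at the character level
theorem pass_toList (a b : Char) (cs : List Char) :
    PySem.Chars.join [b] (PySem.Chars.splitOn cs [a])
      = cs.map (fun c => if c = a then b else c) := by
  rw [splitOn_single]
  simpa using join_pvSplit a b cs []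

theorem pvFix_chain (c : Char) :
    (if (if (if (if c = 'S' then '5' else c) = 'Y' then 'У' else if c = 'S' then '5' else c) = 'N'
          then 'Н' else (if (if c = 'S' then '5' else c) = 'Y' then 'У' else if c = 'S' then '5' else c)) = 'R'
      then 'Р'
      else (if (if (if c = 'S' then '5' else c) = 'Y' then 'У' else if c = 'S' then '5' else c) = 'N'
        then 'Н' else (if (if c = 'S' then '5' else c) = 'Y' then 'У' else if c = 'S' then '5' else c)))
      = pvFix c := by
  by_cases h1 : c = 'S'
  · subst h1; decide
  by_cases h2 : c = 'Y'
  · subst h2; decide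
  by_cases h3 : c = 'N'
  · subst h3; decide
  by_cases h4 : c = 'R'
  · subst h4; decide
  simp [pvFix, h1, h2, h3, h4]

theorem pass_str (a b : Char) (sa sb : String) (p : String)
    (ha : sa.toList = [a]) (hb : sb.toList = [b]) :
    (match PySem.Str.split? p sa with
      | some parts => PySem.Str.join sb parts
      | none => p).toList = p.toList.map (fun c => if c = a then b else c) := by
  have hsplit : PySem.Str.split? p sa
      = some ((PySem.Chars.splitOn p.toList [a]).map String.ofList) := by
    rw [PySem.Str.split?, PySem.Chars.split?, ha]
    simp
  rw [hsplit]
  simp only [PySem.Str.toList_join, hb, List.map_map]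
  have hid : ∀ l : List (List Char), l.map (String.toList ∘ String.ofList) = l := by
    intro l
    induction l with
    | nil => rfl
    | cons x xs ih => simp [ih]
  rw [hid, pass_toList]

theorem alt_toList (plate : String) :
    (correct_plate_alt plate).toList = plate.toList.map pvFix := by
  unfold correct_plate_alt
  simp only [List.foldl_cons, List.foldl_nil]
  rw [pass_str 'R' 'Р' "R" "Р" _ rfl rfl, pass_str 'N' 'Н' "N" "Н" _ rfl rfl,
    pass_str 'Y' 'У' "Y" "У" _ rfl rfl, pass_str 'S' '5' "S" "5" _ rfl rfl]
  simp only [List.map_map]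
  apply List.map_congr_left
  intro c _
  simpa using pvFix_chain c

theorem flatten_intersperse_nil {α : Type} (L : List (List α)) :
    (L.intersperse []).flatten = L.flatten := by
  induction L with
  | nil => rfl
  | cons x xs ih =>
    cases xs with
    | nil => rfl
    | cons y t =>
      simp only [List.intersperse_cons₂, List.flatten_cons] at *
      simp [ih]

-- the dict lookup of A, per character
theorem dict_getD_char (c : Char) :
    ((((PySem.Dict.empty.insert "S" "5").insert "Y" "У" |>.insert "N" "Н" |>.insert "R"
        "Р").getD (String.ofList [c]) (String.ofList [c]))).toList = [pvFix c] := by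
  by_cases h1 : c = 'S'
  · subst h1; decide
  by_cases h2 : c = 'Y'
  · subst h2; decide
  by_cases h3 : c = 'N'
  · subst h3; decide
  by_cases h4 : c = 'R'
  · subst h4; decide
  have hs : ("S" == String.ofList [c]) = false := by
    simp only [beq_eq_false_iff_ne, ne_eq]
    intro h; exact h1 (by simpa using congrArg String.toList h.symm)
  have hy : ("Y" == String.ofList [c]) = false := by
    simp only [beq_eq_false_iff_ne, ne_eq]
    intro h; exact h2 (by simpa using congrArg String.toList h.symm)
  have hn : ("N" == String.ofList [c]) = false := by
    simp only [beq_eq_false_iff_ne, ne_eq]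
    intro h; exact h3 (by simpa using congrArg String.toList h.symm)
  have hr : ("R" == String.ofList [c]) = false := by
    simp only [beq_eq_false_iff_ne, ne_eq]
    intro h; exact h4 (by simpa using congrArg String.toList h.symm)
  simp [PySem.Dict.getD, PySem.Dict.get?, PySem.Dict.insert, PySem.Dict.empty, hs, hy, hn, hr,
    pvFix, h1, h2, h3, h4]

theorem a_toList (plate : String) :
    (correct_plate plate).toList = plate.toList.map pvFix := by
  unfold correct_plate
  simp only [PySem.Str.toList_join, PySem.Chars.join, String.toList_empty, List.intercalate,
    List.map_map, flatten_intersperse_nil]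
  induction plate.toList with
  | nil => rfl
  | cons c t ih =>
    simp only [List.map_cons, List.flatten_cons, Function.comp_apply, dict_getD_char, ih]
    simp

-- ===== VERDICT (by name: the statement is the Claim_ definition above) =====
theorem correct_plate_spec : Claim_equal_correct_plate := by
  intro plate _
  unfold Spec_correct_plate
  have h := (a_toList plate).trans (alt_toList plate).symm
  exact String.ext (by simpa using h)
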